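-- pv_equiv track=rewrite | github.com/ppwnr88/PPTextEditor | scripts/generate_app_icons.py | remove_edge_white
-- ===== SOURCE A (Python) =====
-- from collections import deque
--
-- def remove_edge_white(width, height, pixels):
--     result = list(pixels)
--     visited = set()
--     queue = deque()
--
--     for x in range(width):
--         queue.append((x, 0))
--         queue.append((x, height - 1))
--     for y in range(height):
--         queue.append((0, y))
--         queue.append((width - 1, y))
--
--     def is_background(pixel):
--         red, green, blue, alpha = pixel
--         return alpha > 0 and red >= 245 and green >= 245 and blue >= 245
--
--     while queue:
--         x, y = queue.popleft()
--         if x < 0 or x >= width or y < 0 or y >= height or (x, y) in visited: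
--             continue
--         visited.add((x, y))
--         index = y * width + x
--         if not is_background(result[index]):
--             continue
--
--         result[index] = (255, 255, 255, 0)
--         queue.extend(((x + 1, y), (x - 1, y), (x, y + 1), (x, y - 1)))
--
--     return result
-- ===== SOURCE B (Python) =====
-- def remove_edge_white(width, height, pixels):
--     # Fixpoint of raster-order sweeps over a reach set instead of a BFS queue;
--     # a final comprehension rebuilds the image in one pass.
--     if width <= 0 or height <= 0:
--         return list(pixels)
--
--     def bg(pixel):
--         red, green, blue, alpha = pixel
--         return alpha > 0 and red >= 245 and green >= 245 and blue >= 245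
--
--     reach = set()
--     for y in range(height):
--         for x in range(width):
--             if (x == 0 or x == width - 1 or y == 0 or y == height - 1) \
--                     and bg(pixels[y * width + x]):
--                 reach.add((x, y))
--
--     changed = True
--     while changed:
--         changed = False
--         for y in range(height):
--             for x in range(width):
--                 if (x, y) not in reach and bg(pixels[y * width + x]) and (
--                         (x + 1, y) in reach or (x - 1, y) in reach
--                         or (x, y + 1) in reach or (x, y - 1) in reach):
--                     reach.add((x, y))
--                     changed = True
--
--     return [(255, 255, 255, 0) if (i % width, i // width) in reach else p
--             for i, p in enumerate(pixels)]
-- ===== Notes on version B (the rewrite author's own statement) =====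
-- stated objective: alternative
-- what changed: Replaces A's BFS queue/visited flood fill by repeated raster-order sweeps that grow a border-reach set to a fixpoint, then rebuilds the image in one comprehension pass.
import Mathlib
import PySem

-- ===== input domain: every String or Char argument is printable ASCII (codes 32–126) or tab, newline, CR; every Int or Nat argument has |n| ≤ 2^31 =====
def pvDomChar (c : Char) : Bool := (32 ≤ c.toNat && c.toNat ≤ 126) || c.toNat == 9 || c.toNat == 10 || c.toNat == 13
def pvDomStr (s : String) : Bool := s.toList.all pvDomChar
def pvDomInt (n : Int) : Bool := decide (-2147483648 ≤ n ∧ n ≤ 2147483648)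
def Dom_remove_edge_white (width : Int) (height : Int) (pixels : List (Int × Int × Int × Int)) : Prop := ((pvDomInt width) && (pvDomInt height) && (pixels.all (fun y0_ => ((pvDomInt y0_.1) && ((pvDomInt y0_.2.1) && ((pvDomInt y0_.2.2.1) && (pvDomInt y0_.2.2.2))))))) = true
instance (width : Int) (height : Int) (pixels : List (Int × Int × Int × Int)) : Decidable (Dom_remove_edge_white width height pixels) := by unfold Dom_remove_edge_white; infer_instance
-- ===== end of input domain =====

-- B replaces A's BFS queue flood fill by a fixpoint of raster-order sweeps over a reach
-- set plus one rebuilding pass (objective: alternative — a different algorithm, not faster).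

-- shared helper: the grid cells in raster order (used by B's port; for A only in the
-- termination measure of its loop, not in its computation)
def pvCells (w h : Int) : List (Int × Int) :=
  (PySem.List.pyRange 0 h 1).flatMap (fun y => (PySem.List.pyRange 0 w 1).map (fun x => (x, y)))

-- counting lemmas used by both termination arguments
theorem pvCountP_lt_of_strict {α : Type} (p p' : α → Bool) (l : List α)
    (hsub : ∀ a, p' a = true → p a = true) {c : α} (hc : c ∈ l) (hp : p c = true)
    (hp' : p' c = false) : l.countP p' < l.countP p := by
  obtain ⟨s, t, rfl⟩ := List.append_of_mem hc
  have h1 := List.countP_mono_left (l := s) (p := p') (q := p) (fun a _ => hsub a)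
  have h2 := List.countP_mono_left (l := t) (p := p') (q := p) (fun a _ => hsub a)
  simp [List.countP_append, List.countP_cons, hp, hp']
  omega

def pvRemain (w h : Int) (v : List (Int × Int)) : Nat :=
  ((pvCells w h).filter (fun d => !v.contains d)).length

theorem pvRemain_lt {w h : Int} {v v' : List (Int × Int)} (hsub : ∀ a, a ∈ v → a ∈ v')
    {c : Int × Int} (hc : c ∈ pvCells w h) (hcv : c ∉ v) (hcv' : c ∈ v') :
    pvRemain w h v' < pvRemain w h v := by
  unfold pvRemain
  rw [← List.countP_eq_length_filter]
  conv_rhs => rw [← List.countP_eq_length_filter]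
  refine pvCountP_lt_of_strict _ _ _ ?_ hc ?_ ?_
  · intro a ha
    simp only [Bool.not_eq_eq_eq_not, Bool.not_true, List.contains_eq_mem,
      decide_eq_false_iff_not] at ha ⊢
    exact fun hav => ha (hsub a hav)
  · simp [hcv]
  · simp [hcv']

theorem pvMem_cells {w h x y : Int} (hx : 0 ≤ x) (hxw : x < w) (hy : 0 ≤ y) (hyh : y < h) :
    (x, y) ∈ pvCells w h := by
  unfold pvCells
  rw [List.mem_flatMap]
  exact ⟨y, by rw [PySem.List.mem_pyRange_one]; exact ⟨hy, hyh⟩,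
    List.mem_map.mpr ⟨x, by rw [PySem.List.mem_pyRange_one]; exact ⟨hx, hxw⟩, rfl⟩⟩

-- ===== PORT A =====
def pvIsBackgroundA (pixel : Int × Int × Int × Int) : Bool :=
  match pixel with
  | (red, green, blue, alpha) =>
    decide (0 < alpha) && decide (245 ≤ red) && decide (245 ≤ green) && decide (245 ≤ blue)

def pvSeedQueue (w h : Int) : List (Int × Int) :=
  (PySem.List.pyRange 0 w 1).flatMap (fun x => [(x, 0), (x, h - 1)]) ++
  (PySem.List.pyRange 0 h 1).flatMap (fun y => [(0, y), (w - 1, y)])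

def pvBfs (w h : Int) (visited : PySem.Set (Int × Int))
    (result : List (Int × Int × Int × Int)) (queue : List (Int × Int)) :
    List (Int × Int × Int × Int) :=
  match queue with
  | [] => result
  | (x, y) :: rest =>
    if x < 0 ∨ w ≤ x ∨ y < 0 ∨ h ≤ y ∨ (x, y) ∈ visited then
      pvBfs w h visited result rest
    else
      let visited' := PySem.Set.add visited (x, y)
      match PySem.List.pyGet? result (y * w + x) with
      | none => result   -- Python raises IndexError here; excluded by Pre_
      | some pixel =>
        if pvIsBackgroundA pixel then
          pvBfs w h visited' (PySem.List.pySetD result (y * w + x) (255, 255, 255, 0))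
            (rest ++ [(x + 1, y), (x - 1, y), (x, y + 1), (x, y - 1)])
        else
          pvBfs w h visited' result rest
termination_by 5 * (pvCells w h).countP (fun d => !decide (d ∈ visited)) + queue.length
decreasing_by
  · simp only [List.length_cons]; omega
  · have h : ¬(x < 0 ∨ w ≤ x ∨ y < 0 ∨ h ≤ y ∨ (x, y) ∈ visited) := by assumption
    push_neg at h
    obtain ⟨hx0, hxw, hy0, hyh, hv⟩ := h
    have hlt := pvRemain_lt (v := visited) (v' := PySem.Set.add visited (x, y))
      (fun a ha => (PySem.Set.mem_add _ _ _).mpr (Or.inl ha))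
      (pvMem_cells hx0 hxw hy0 hyh) hv ((PySem.Set.mem_add _ _ _).mpr (Or.inr rfl))
    simp only [pvRemain, ← List.countP_eq_length_filter, List.contains_eq_mem] at hlt
    simp only [List.length_append, List.length_cons, List.length_nil]
    omega
  · have h : ¬(x < 0 ∨ w ≤ x ∨ y < 0 ∨ h ≤ y ∨ (x, y) ∈ visited) := by assumption
    push_neg at h
    obtain ⟨hx0, hxw, hy0, hyh, hv⟩ := h
    have hlt := pvRemain_lt (v := visited) (v' := PySem.Set.add visited (x, y))
      (fun a ha => (PySem.Set.mem_add _ _ _).mpr (Or.inl ha))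
      (pvMem_cells hx0 hxw hy0 hyh) hv ((PySem.Set.mem_add _ _ _).mpr (Or.inr rfl))
    simp only [pvRemain, ← List.countP_eq_length_filter, List.contains_eq_mem] at hlt
    simp only [List.length_cons]
    omega

def remove_edge_white (width : Int) (height : Int) (pixels : List (Int × Int × Int × Int)) :
    List (Int × Int × Int × Int) :=
  pvBfs width height PySem.Set.empty pixels (pvSeedQueue width height)

-- ===== PORT B =====
def pvAltBg (pixel : Int × Int × Int × Int) : Bool :=
  decide (0 < pixel.2.2.2 ∧ 245 ≤ pixel.1 ∧ 245 ≤ pixel.2.1 ∧ 245 ≤ pixel.2.2.1)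

def pvBgAt (w : Int) (pixels : List (Int × Int × Int × Int)) (c : Int × Int) : Bool :=
  pvAltBg (PySem.List.pyGetD pixels (c.2 * w + c.1) (0, 0, 0, 0))

def pvInitReach (w h : Int) (pixels : List (Int × Int × Int × Int)) : PySem.Set (Int × Int) :=
  (pvCells w h).foldl
    (fun r c =>
      if (c.1 = 0 ∨ c.1 = w - 1 ∨ c.2 = 0 ∨ c.2 = h - 1) ∧ pvBgAt w pixels c = true
      then PySem.Set.add r c else r)
    PySem.Set.empty

def pvStep (w : Int) (pixels : List (Int × Int × Int × Int))
    (s : PySem.Set (Int × Int) × Bool) (c : Int × Int) : PySem.Set (Int × Int) × Bool :=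
  if c ∉ s.1 ∧ pvBgAt w pixels c = true ∧
      ((c.1 + 1, c.2) ∈ s.1 ∨ (c.1 - 1, c.2) ∈ s.1 ∨ (c.1, c.2 + 1) ∈ s.1 ∨ (c.1, c.2 - 1) ∈ s.1)
  then (PySem.Set.add s.1 c, true) else s

def pvSweep (w h : Int) (pixels : List (Int × Int × Int × Int)) (reach : PySem.Set (Int × Int)) :
    PySem.Set (Int × Int) × Bool :=
  (pvCells w h).foldl (pvStep w pixels) (reach, false)

-- facts about one sweep, needed (the first two) by pvLoop's termination argument
theorem pvFoldl_step_mono (w : Int) (pixels : List (Int × Int × Int × Int))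
    (l : List (Int × Int)) (s : PySem.Set (Int × Int) × Bool) {a : Int × Int} (ha : a ∈ s.1) :
    a ∈ (l.foldl (pvStep w pixels) s).1 := by
  induction l generalizing s with
  | nil => exact ha
  | cons c l ih =>
    simp only [List.foldl_cons]
    refine ih (pvStep w pixels s c) ?_
    unfold pvStep
    split
    · exact (PySem.Set.mem_add _ _ _).mpr (Or.inl ha)
    · exact ha

theorem pvFoldl_step_progress (w : Int) (pixels : List (Int × Int × Int × Int))
    (l : List (Int × Int)) (s : PySem.Set (Int × Int) × Bool)
    (ht : (l.foldl (pvStep w pixels) s).2 = true) :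
    s.2 = true ∨ ∃ c ∈ l, c ∉ s.1 ∧ c ∈ (l.foldl (pvStep w pixels) s).1 := by
  induction l generalizing s with
  | nil => exact Or.inl ht
  | cons c l ih =>
    by_cases hfire : c ∉ s.1 ∧ pvBgAt w pixels c = true ∧
        ((c.1 + 1, c.2) ∈ s.1 ∨ (c.1 - 1, c.2) ∈ s.1 ∨ (c.1, c.2 + 1) ∈ s.1 ∨ (c.1, c.2 - 1) ∈ s.1)
    · refine Or.inr ⟨c, List.mem_cons_self, hfire.1, ?_⟩
      have : c ∈ (pvStep w pixels s c).1 := by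
        unfold pvStep; rw [if_pos hfire]; exact (PySem.Set.mem_add _ _ _).mpr (Or.inr rfl)
      simpa using pvFoldl_step_mono w pixels l (pvStep w pixels s c) this
    · have hs : pvStep w pixels s c = s := by unfold pvStep; rw [if_neg hfire]
      simp only [List.foldl_cons, hs] at ht ⊢
      rcases ih s ht with h | ⟨d, hd, h1, h2⟩
      · exact Or.inl h
      · exact Or.inr ⟨d, List.mem_cons_of_mem _ hd, h1, h2⟩

def pvLoop (w h : Int) (pixels : List (Int × Int × Int × Int)) (reach : PySem.Set (Int × Int)) :
    PySem.Set (Int × Int) :=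
  let s := pvSweep w h pixels reach
  if hs : s.2 = true then pvLoop w h pixels s.1 else s.1
termination_by (pvCells w h).countP (fun d => !decide (d ∈ reach))
decreasing_by
  have hs' : (List.foldl (pvStep w pixels) (reach, false) (pvCells w h)).2 = true := by
    simpa [pvSweep] using hs
  rcases pvFoldl_step_progress w pixels (pvCells w h) (reach, false) hs' with h | ⟨c, hc, h1, h2⟩
  · simp at h
  · have hlt := pvRemain_lt (v := reach)
      (v' := (List.foldl (pvStep w pixels) (reach, false) (pvCells w h)).1)
      (fun a ha => pvFoldl_step_mono w pixels (pvCells w h) (reach, false) ha) hc h1 h2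
    simpa only [pvRemain, ← List.countP_eq_length_filter, List.contains_eq_mem] using hlt

def remove_edge_white_alt (width : Int) (height : Int)
    (pixels : List (Int × Int × Int × Int)) : List (Int × Int × Int × Int) :=
  if width ≤ 0 ∨ height ≤ 0 then pixels
  else
    let reach := pvLoop width height pixels (pvInitReach width height pixels)
    (PySem.List.enumerate pixels).map
      (fun ip =>
        if (PySem.Int.mod ip.1 width, PySem.Int.floordiv ip.1 width) ∈ reach
        then (255, 255, 255, 0) else ip.2)

-- ===== PRECONDITION & SPEC =====
-- Pre_ excludes exactly the inputs where Python A raises IndexError: a positive grid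
-- larger than the pixel list.
def Pre_remove_edge_white (width : Int) (height : Int) (pixels : List (Int × Int × Int × Int)) : Prop :=
  width ≤ 0 ∨ height ≤ 0 ∨ width * height ≤ pixels.length
instance (width : Int) (height : Int) (pixels : List (Int × Int × Int × Int)) : Decidable (Pre_remove_edge_white width height pixels) := by unfold Pre_remove_edge_white; infer_instance

def pvWitness_remove_edge_white : Int × Int × (List (Int × Int × Int × Int)) :=
  (2, 2, [(255, 255, 255, 255), (0, 0, 0, 255), (255, 255, 255, 255), (250, 250, 250, 255)])

def Spec_remove_edge_white (width : Int) (height : Int) (pixels : List (Int × Int × Int × Int)) (out : List (Int × Int × Int × Int)) : Prop := out = remove_edge_white_alt width height pixels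
instance (width : Int) (height : Int) (pixels : List (Int × Int × Int × Int)) (out : List (Int × Int × Int × Int)) : Decidable (Spec_remove_edge_white width height pixels out) := by unfold Spec_remove_edge_white; infer_instance

-- ===== CLAIM (what is proved, stated in full; the proofs are below) =====
def Claim_equal_remove_edge_white : Prop := ∀ (width : Int) (height : Int) (pixels : List (Int × Int × Int × Int)), Dom_remove_edge_white width height pixels → Pre_remove_edge_white width height pixels → Spec_remove_edge_white width height pixels (remove_edge_white width height pixels)


-- ===== LEMMAS AND PROOFS =====

def pvInGrid (w h : Int) (c : Int × Int) : Prop :=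
  0 ≤ c.1 ∧ c.1 < w ∧ 0 ≤ c.2 ∧ c.2 < h

def pvBorderP (w h : Int) (c : Int × Int) : Prop :=
  pvInGrid w h c ∧ (c.1 = 0 ∨ c.1 = w - 1 ∨ c.2 = 0 ∨ c.2 = h - 1)

def pvAdj (d c : Int × Int) : Prop :=
  c = (d.1 + 1, d.2) ∨ c = (d.1 - 1, d.2) ∨ c = (d.1, d.2 + 1) ∨ c = (d.1, d.2 - 1)

-- cells reachable from the border through background pixels: the set both programs clear
inductive pvReach (w h : Int) (pixels : List (Int × Int × Int × Int)) : Int × Int → Prop where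
  | border (c : Int × Int) : pvBorderP w h c → pvBgAt w pixels c = true → pvReach w h pixels c
  | step (d c : Int × Int) : pvReach w h pixels d → pvAdj d c → pvInGrid w h c →
      pvBgAt w pixels c = true → pvReach w h pixels c

def pvCoord (w : Int) (i : Nat) : Int × Int := ((i : Int) % w, (i : Int) / w)

theorem pvReach_bg {w h : Int} {pixels : List (Int × Int × Int × Int)} {c : Int × Int}
    (hr : pvReach w h pixels c) : pvBgAt w pixels c = true := by
  cases hr with
  | border _ _ hbg => exact hbg
  | step _ _ _ _ _ hbg => exact hbg

theorem pvAltBg_eq (p : Int × Int × Int × Int) : pvAltBg p = pvIsBackgroundA p := by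
  obtain ⟨r, g, b, a⟩ := p
  simp [pvAltBg, pvIsBackgroundA, Bool.and_assoc]

theorem pvMem_cells_iff {w h : Int} {c : Int × Int} :
    c ∈ pvCells w h ↔ pvInGrid w h c := by
  constructor
  · intro hc
    unfold pvCells at hc
    rw [List.mem_flatMap] at hc
    obtain ⟨y, hy, hx⟩ := hc
    rw [List.mem_map] at hx
    obtain ⟨x, hx, rfl⟩ := hx
    rw [PySem.List.mem_pyRange_one] at hy hx
    exact ⟨hx.1, hx.2, hy.1, hy.2⟩
  · intro ⟨h1, h2, h3, h4⟩
    obtain ⟨x, y⟩ := c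
    exact pvMem_cells h1 h2 h3 h4

theorem pvCoord_idx {w x y : Int} (hw : 0 < w) (hx : 0 ≤ x) (hxw : x < w) (hy : 0 ≤ y) :
    pvCoord w (y * w + x).toNat = (x, y) := by
  have h0 : (0 : Int) ≤ y * w + x := by positivity
  unfold pvCoord
  rw [Int.toNat_of_nonneg h0, Prod.mk.injEq]
  constructor
  · show (y * w + x) % w = x
    rw [add_comm, mul_comm y w, Int.add_mul_emod_self_left, Int.emod_eq_of_lt hx hxw]
  · show (y * w + x) / w = y
    rw [add_comm, Int.add_mul_ediv_right _ _ (by omega : w ≠ 0),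
      Int.ediv_eq_zero_of_lt hx hxw, zero_add]

theorem pvIdx_coord {w : Int} (hw : 0 < w) (i : Nat) :
    (pvCoord w i).2 * w + (pvCoord w i).1 = (i : Int) := by
  unfold pvCoord
  have h := Int.ediv_add_emod (i : Int) w
  linear_combination h

theorem pvIdx_lt {w h x y : Int} (hw : 0 < w) (hx : 0 ≤ x) (hxw : x < w)
    (hy : 0 ≤ y) (hyh : y < h) : y * w + x < w * h := by
  have h1 : (y + 1) * w ≤ h * w := by
    exact mul_le_mul_of_nonneg_right (by omega) (by omega)
  nlinarith

-- B side: the initial reach set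
theorem pvFoldl_addif_mem (Q : Int × Int → Prop) [DecidablePred Q] (l : List (Int × Int))
    (r0 : PySem.Set (Int × Int)) (a : Int × Int) :
    a ∈ l.foldl (fun r c => if Q c then PySem.Set.add r c else r) r0 ↔
      a ∈ r0 ∨ (a ∈ l ∧ Q a) := by
  induction l generalizing r0 with
  | nil => simp
  | cons c l ih =>
    simp only [List.foldl_cons, ih]
    by_cases hq : Q c
    · rw [if_pos hq]
      constructor
      · rintro (h | h)
        · rcases (PySem.Set.mem_add _ _ _).mp h with h | rfl
          · exact Or.inl h
          · exact Or.inr ⟨List.mem_cons_self, hq⟩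
        · exact Or.inr ⟨List.mem_cons_of_mem _ h.1, h.2⟩
      · rintro (h | ⟨hm, hqa⟩)
        · exact Or.inl ((PySem.Set.mem_add _ _ _).mpr (Or.inl h))
        · rcases List.mem_cons.mp hm with rfl | hm
          · exact Or.inl ((PySem.Set.mem_add _ _ _).mpr (Or.inr rfl))
          · exact Or.inr ⟨hm, hqa⟩
    · rw [if_neg hq]
      constructor
      · rintro (h | h)
        · exact Or.inl h
        · exact Or.inr ⟨List.mem_cons_of_mem _ h.1, h.2⟩
      · rintro (h | ⟨hm, hqa⟩)
        · exact Or.inl h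
        · rcases List.mem_cons.mp hm with rfl | hm
          · exact absurd hqa hq
          · exact Or.inr ⟨hm, hqa⟩

theorem pvInitReach_mem {w h : Int} {pixels : List (Int × Int × Int × Int)} {c : Int × Int} :
    c ∈ pvInitReach w h pixels ↔ pvBorderP w h c ∧ pvBgAt w pixels c = true := by
  unfold pvInitReach
  rw [pvFoldl_addif_mem
    (Q := fun c => (c.1 = 0 ∨ c.1 = w - 1 ∨ c.2 = 0 ∨ c.2 = h - 1) ∧ pvBgAt w pixels c = true)]
  unfold pvBorderP
  rw [pvMem_cells_iff]
  constructor
  · rintro (h | ⟨hg, hs, hbg⟩)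
    · simp [PySem.Set.empty] at h
    · exact ⟨⟨hg, hs⟩, hbg⟩
  · rintro ⟨⟨hg, hs⟩, hbg⟩
    exact Or.inr ⟨hg, hs, hbg⟩

-- one sweep: sound, and a fixpoint when the flag stays false
theorem pvFoldl_step_sound {w h : Int} {pixels : List (Int × Int × Int × Int)}
    (l : List (Int × Int)) (hl : ∀ c ∈ l, pvInGrid w h c)
    (s : PySem.Set (Int × Int) × Bool) (hs : ∀ a ∈ s.1, pvReach w h pixels a) :
    ∀ a ∈ (l.foldl (pvStep w pixels) s).1, pvReach w h pixels a := by
  induction l generalizing s with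
  | nil => exact hs
  | cons c l ih =>
    simp only [List.foldl_cons]
    refine ih (fun d hd => hl d (List.mem_cons_of_mem _ hd)) (pvStep w pixels s c) ?_
    intro a ha
    unfold pvStep at ha
    split at ha
    · next hcond =>
      rcases (PySem.Set.mem_add _ _ _).mp ha with ha | rfl
      · exact hs a ha
      · obtain ⟨-, hbg, hnb⟩ := hcond
        have hg := hl a List.mem_cons_self
        rcases hnb with hn | hn | hn | hn
        · exact pvReach.step _ _ (hs _ hn) (Or.inr (Or.inl (by simp))) hg hbg
        · exact pvReach.step _ _ (hs _ hn) (Or.inl (by simp)) hg hbg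
        · exact pvReach.step _ _ (hs _ hn) (Or.inr (Or.inr (Or.inr (by simp)))) hg hbg
        · exact pvReach.step _ _ (hs _ hn) (Or.inr (Or.inr (Or.inl (by simp)))) hg hbg
    · exact hs a ha

theorem pvFoldl_step_nochange {w : Int} {pixels : List (Int × Int × Int × Int)}
    (l : List (Int × Int)) (s : PySem.Set (Int × Int) × Bool)
    (hf : (l.foldl (pvStep w pixels) s).2 = false) :
    (l.foldl (pvStep w pixels) s).1 = s.1 ∧ s.2 = false ∧
      ∀ c ∈ l, ¬(c ∉ s.1 ∧ pvBgAt w pixels c = true ∧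
        ((c.1 + 1, c.2) ∈ s.1 ∨ (c.1 - 1, c.2) ∈ s.1 ∨
         (c.1, c.2 + 1) ∈ s.1 ∨ (c.1, c.2 - 1) ∈ s.1)) := by
  induction l generalizing s with
  | nil => exact ⟨rfl, hf, by simp⟩
  | cons c l ih =>
    simp only [List.foldl_cons] at hf ⊢
    by_cases hfire : c ∉ s.1 ∧ pvBgAt w pixels c = true ∧
        ((c.1 + 1, c.2) ∈ s.1 ∨ (c.1 - 1, c.2) ∈ s.1 ∨
         (c.1, c.2 + 1) ∈ s.1 ∨ (c.1, c.2 - 1) ∈ s.1)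
    · exfalso
      have h1 : (pvStep w pixels s c).2 = true := by
        unfold pvStep; rw [if_pos hfire]
      have := (ih (pvStep w pixels s c) hf).2.1
      rw [h1] at this
      exact Bool.true_eq_false.mp this
    · have hs : pvStep w pixels s c = s := by unfold pvStep; rw [if_neg hfire]
      rw [hs] at hf ⊢
      obtain ⟨h1, h2, h3⟩ := ih s hf
      refine ⟨h1, h2, ?_⟩
      intro d hd
      rcases List.mem_cons.mp hd with rfl | hd
      · exact hfire
      · exact h3 d hd

theorem pvLoop_mono {w h : Int} {pixels : List (Int × Int × Int × Int)}
    (reach : PySem.Set (Int × Int)) {a : Int × Int} (ha : a ∈ reach) :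
    a ∈ pvLoop w h pixels reach := by
  fun_induction pvLoop with
  | case1 r s hs ih =>
    exact ih (by
      simpa [pvSweep] using pvFoldl_step_mono w pixels (pvCells w h) (r, false) ha)
  | case2 r s hs =>
    simpa [pvSweep] using pvFoldl_step_mono w pixels (pvCells w h) (r, false) ha

theorem pvLoop_sound {w h : Int} {pixels : List (Int × Int × Int × Int)}
    (reach : PySem.Set (Int × Int)) (hr : ∀ a ∈ reach, pvReach w h pixels a) :
    ∀ a ∈ pvLoop w h pixels reach, pvReach w h pixels a := by
  fun_induction pvLoop with
  | case1 r s hs ih =>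
    refine ih ?_
    intro a ha
    refine pvFoldl_step_sound (pvCells w h) (fun c hc => pvMem_cells_iff.mp hc)
      (r, false) hr a ?_
    simpa [pvSweep] using ha
  | case2 r s hs =>
    intro a ha
    refine pvFoldl_step_sound (pvCells w h) (fun c hc => pvMem_cells_iff.mp hc)
      (r, false) hr a ?_
    simpa [pvSweep] using ha

theorem pvLoop_closed {w h : Int} {pixels : List (Int × Int × Int × Int)}
    (reach : PySem.Set (Int × Int)) {c : Int × Int} (hg : pvInGrid w h c)
    (hbg : pvBgAt w pixels c = true)
    (hnb : (c.1 + 1, c.2) ∈ pvLoop w h pixels reach ∨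
           (c.1 - 1, c.2) ∈ pvLoop w h pixels reach ∨
           (c.1, c.2 + 1) ∈ pvLoop w h pixels reach ∨
           (c.1, c.2 - 1) ∈ pvLoop w h pixels reach) :
    c ∈ pvLoop w h pixels reach := by
  revert hnb
  fun_induction pvLoop with
  | case1 r s hs ih => exact ih
  | case2 r s hs =>
    intro hnb
    have hf : (List.foldl (pvStep w pixels) (r, false) (pvCells w h)).2 = false := by
      simpa [pvSweep] using hs
    obtain ⟨h1, -, h3⟩ := pvFoldl_step_nochange (pvCells w h) (r, false) hf
    have h1' : (pvSweep w h pixels r).1 = r := by simpa [pvSweep] using h1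
    rw [h1'] at hnb ⊢
    by_cases hcr : c ∈ r
    · exact hcr
    · exact absurd ⟨hcr, hbg, by simpa [pvSweep, h1'] using hnb⟩ (h3 c (pvMem_cells_iff.mpr hg))

theorem pvFill_mem_iff {w h : Int} {pixels : List (Int × Int × Int × Int)} (c : Int × Int) :
    c ∈ pvLoop w h pixels (pvInitReach w h pixels) ↔ pvReach w h pixels c := by
  constructor
  · exact fun hc => pvLoop_sound _
      (fun a ha => pvReach.border a (pvInitReach_mem.mp ha).1 (pvInitReach_mem.mp ha).2) c hc
  · intro hr
    induction hr with
    | border d hb hbg => exact pvLoop_mono _ (pvInitReach_mem.mpr ⟨hb, hbg⟩)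
    | step d c hrd hadj hg hbg ih =>
      refine pvLoop_closed _ hg hbg ?_
      rcases hadj with h | h | h | h
      · subst h; refine Or.inr (Or.inl ?_); simpa using ih
      · subst h; refine Or.inl ?_; simpa using ih
      · subst h; refine Or.inr (Or.inr (Or.inr ?_)); simpa using ih
      · subst h; refine Or.inr (Or.inr (Or.inl ?_)); simpa using ih


-- A side: the BFS loop computes exactly the pvReach-marked image
theorem pvBfs_char {w h : Int} {pixels : List (Int × Int × Int × Int)}
    (hw : 0 < w) (hh : 0 < h) (hlen : w * h ≤ (pixels.length : Int)) :
    ∀ (visited : PySem.Set (Int × Int)) (result : List (Int × Int × Int × Int))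
      (queue : List (Int × Int)),
      result.length = pixels.length →
      (∀ c ∈ visited, pvInGrid w h c) →
      (∀ i : Nat, i < pixels.length →
        ((pvCoord w i ∈ visited ∧ pvBgAt w pixels (pvCoord w i) = true) →
          result[i]? = some (255, 255, 255, 0)) ∧
        (¬(pvCoord w i ∈ visited ∧ pvBgAt w pixels (pvCoord w i) = true) →
          result[i]? = pixels[i]?)) →
      (∀ c ∈ visited, pvBgAt w pixels c = true → pvReach w h pixels c) →
      (∀ c ∈ queue, pvBorderP w h c ∨ ∃ d ∈ visited, pvBgAt w pixels d = true ∧ pvAdj d c) →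
      (∀ c, pvBorderP w h c → c ∈ visited ∨ c ∈ queue) →
      (∀ c d, c ∈ visited → pvBgAt w pixels c = true → pvAdj c d → pvInGrid w h d →
        d ∈ visited ∨ d ∈ queue) →
      (pvBfs w h visited result queue).length = pixels.length ∧
      ∀ i : Nat, i < pixels.length →
        (pvReach w h pixels (pvCoord w i) →
          (pvBfs w h visited result queue)[i]? = some (255, 255, 255, 0)) ∧
        (¬ pvReach w h pixels (pvCoord w i) →
          (pvBfs w h visited result queue)[i]? = pixels[i]?) := by
  intro visited result queue
  fun_induction pvBfs w h visited result queue with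
  | case1 v r =>
    intro hL hG hR hS hQ hC1 hC2
    have hcov : ∀ c, pvReach w h pixels c → c ∈ v := by
      intro c hre
      induction hre with
      | border d hb hbg =>
        rcases hC1 d hb with hm | hm
        · exact hm
        · simp at hm
      | step d e hrd hadj hg hbg ihd =>
        rcases hC2 d e ihd (pvReach_bg hrd) hadj hg with hm | hm
        · exact hm
        · simp at hm
    refine ⟨hL, fun i hi => ⟨fun hre => (hR i hi).1 ⟨hcov _ hre, pvReach_bg hre⟩,
      fun hnr => (hR i hi).2 (fun hm => hnr (hS _ hm.1 hm.2))⟩⟩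
  | case2 v r x y rest hcond ih =>
    intro hL hG hR hS hQ hC1 hC2
    refine ih hL hG hR hS (fun c hc => hQ c (List.mem_cons_of_mem _ hc)) ?_ ?_
    · intro c hb
      rcases hC1 c hb with hm | hm
      · exact Or.inl hm
      · rcases List.mem_cons.mp hm with rfl | hm
        · obtain ⟨⟨h1, h2, h3, h4⟩, -⟩ := hb
          rcases hcond with h' | h' | h' | h' | h'
          · exact absurd h' (by omega)
          · exact absurd h' (by omega)
          · exact absurd h' (by omega)
          · exact absurd h' (by omega)
          · exact Or.inl h'
        · exact Or.inr hm
    · intro c d hc hbg hadj hgd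
      rcases hC2 c d hc hbg hadj hgd with hm | hm
      · exact Or.inl hm
      · rcases List.mem_cons.mp hm with rfl | hm
        · obtain ⟨h1, h2, h3, h4⟩ := hgd
          rcases hcond with h' | h' | h' | h' | h'
          · exact absurd h' (by omega)
          · exact absurd h' (by omega)
          · exact absurd h' (by omega)
          · exact absurd h' (by omega)
          · exact Or.inl h'
        · exact Or.inr hm
  | case3 v r x y rest hncond hnone =>
    intro hL hG hR hS hQ hC1 hC2
    exfalso
    push_neg at hncond
    obtain ⟨hx0, hxw, hy0, hyh, hv⟩ := hncond
    have hyw : (0 : Int) ≤ y * w := mul_nonneg hy0 (by omega)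
    have hiltI : y * w + x < w * h := pvIdx_lt (by omega) hx0 hxw hy0 hyh
    rw [PySem.List.pyGet?_eq_none_iff] at hnone
    apply hnone
    unfold PySem.Raise.InRange
    omega
  | case4 v r x y rest hncond visited' pixel hget hbg ih =>
    intro hL hG hR hS hQ hC1 hC2
    push_neg at hncond
    obtain ⟨hx0, hxw, hy0, hyh, hv⟩ := hncond
    have hyw : (0 : Int) ≤ y * w := mul_nonneg hy0 (by omega)
    have hidx0 : (0 : Int) ≤ y * w + x := by omega
    have hiltI : y * w + x < w * h := pvIdx_lt (by omega) hx0 hxw hy0 hyh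
    have hi0I : (((y * w + x).toNat : Nat) : Int) = y * w + x := Int.toNat_of_nonneg hidx0
    have hi0len : (y * w + x).toNat < pixels.length := by omega
    have hcoord : pvCoord w (y * w + x).toNat = (x, y) := pvCoord_idx (by omega) hx0 hxw hy0
    have hget' : r[(y * w + x).toNat]? = some pixel := by
      rw [PySem.List.pyGet?_of_nonneg r hidx0] at hget
      exact hget
    have hpx : r[(y * w + x).toNat]? = pixels[(y * w + x).toNat]? :=
      (hR _ hi0len).2 (fun hm => hv (hcoord ▸ hm.1))
    have hpix : pixels[(y * w + x).toNat]? = some pixel := by rw [← hpx, hget']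
    have hgd : PySem.List.pyGetD pixels (y * w + x) (0, 0, 0, 0) = pixel := by
      rw [PySem.List.pyGetD_of_nonneg pixels _ hidx0, List.getD_eq_getElem?_getD, hpix]
      exact rfl
    have hbgc : pvBgAt w pixels (x, y) = true := by
      show pvAltBg (PySem.List.pyGetD pixels (y * w + x) (0, 0, 0, 0)) = true
      rw [hgd, pvAltBg_eq]
      exact hbg
    have hmem' : ∀ a, a ∈ PySem.Set.add v (x, y) ↔ a ∈ v ∨ a = (x, y) :=
      fun a => PySem.Set.mem_add _ _ _
    have hreach0 : pvReach w h pixels (x, y) := by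
      rcases hQ (x, y) List.mem_cons_self with hb | ⟨d, hd, hbgd, hadj⟩
      · exact pvReach.border _ hb hbgc
      · exact pvReach.step d _ (hS d hd hbgd) hadj ⟨hx0, hxw, hy0, hyh⟩ hbgc
    have hAdjL : ∀ c', pvAdj (x, y) c' ↔
        c' ∈ [(x + 1, y), (x - 1, y), (x, y + 1), (x, y - 1)] := by
      intro c'
      simp [pvAdj]
    have hset : PySem.List.pySetD r (y * w + x) (255, 255, 255, 0) =
        r.set (y * w + x).toNat (255, 255, 255, 0) := PySem.List.pySetD_of_nonneg r _ hidx0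
    refine ih ?_ ?_ ?_ ?_ ?_ ?_ ?_
    · rw [PySem.List.length_pySetD]; exact hL
    · intro c hc
      rcases (hmem' c).mp hc with hc | rfl
      · exact hG c hc
      · exact ⟨hx0, hxw, hy0, hyh⟩
    · intro i hi
      by_cases hieq : i = (y * w + x).toNat
      · subst hieq
        constructor
        · intro _
          rw [hset, List.getElem?_set, if_pos rfl, if_pos (by omega)]
        · intro hnm
          exfalso
          exact hnm ⟨by rw [hcoord]; exact (hmem' _).mpr (Or.inr rfl), by rw [hcoord]; exact hbgc⟩
      · have hcne : pvCoord w i ≠ (x, y) := by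
          intro he
          apply hieq
          have h1 : (i : Int) = y * w + x := by
            rw [← pvIdx_coord (by omega : (0:Int) < w) i, he]
          omega
        have hent : (PySem.List.pySetD r (y * w + x) (255, 255, 255, 0))[i]? = r[i]? := by
          rw [hset, List.getElem?_set, if_neg (fun he => hieq he.symm)]
        rw [hent]
        constructor
        · intro hm
          refine (hR i hi).1 ⟨?_, hm.2⟩
          rcases (hmem' _).mp hm.1 with hmm | hmm
          · exact hmm
          · exact absurd hmm hcne
        · intro hnm
          refine (hR i hi).2 (fun hm => hnm ⟨(hmem' _).mpr (Or.inl hm.1), hm.2⟩)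
    · intro c hc hbgcc
      rcases (hmem' c).mp hc with hc | rfl
      · exact hS c hc hbgcc
      · exact hreach0
    · intro c hc
      rcases List.mem_append.mp hc with hc | hc
      · rcases hQ c (List.mem_cons_of_mem _ hc) with hb | ⟨d, hd, hbgd, hadj⟩
        · exact Or.inl hb
        · exact Or.inr ⟨d, (hmem' d).mpr (Or.inl hd), hbgd, hadj⟩
      · exact Or.inr ⟨(x, y), (hmem' _).mpr (Or.inr rfl), hbgc, (hAdjL c).mpr hc⟩
    · intro c hb
      rcases hC1 c hb with hm | hm
      · exact Or.inl ((hmem' c).mpr (Or.inl hm))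
      · rcases List.mem_cons.mp hm with rfl | hm
        · exact Or.inl ((hmem' _).mpr (Or.inr rfl))
        · exact Or.inr (List.mem_append.mpr (Or.inl hm))
    · intro c d hc hbgcc hadj hgd
      rcases (hmem' c).mp hc with hc | rfl
      · rcases hC2 c d hc hbgcc hadj hgd with hm | hm
        · exact Or.inl ((hmem' d).mpr (Or.inl hm))
        · rcases List.mem_cons.mp hm with rfl | hm
          · exact Or.inl ((hmem' _).mpr (Or.inr rfl))
          · exact Or.inr (List.mem_append.mpr (Or.inl hm))
      · exact Or.inr (List.mem_append.mpr (Or.inr ((hAdjL d).mp hadj)))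
  | case5 v r x y rest hncond visited' pixel hget hbg ih =>
    intro hL hG hR hS hQ hC1 hC2
    push_neg at hncond
    obtain ⟨hx0, hxw, hy0, hyh, hv⟩ := hncond
    have hyw : (0 : Int) ≤ y * w := mul_nonneg hy0 (by omega)
    have hidx0 : (0 : Int) ≤ y * w + x := by omega
    have hiltI : y * w + x < w * h := pvIdx_lt (by omega) hx0 hxw hy0 hyh
    have hi0I : (((y * w + x).toNat : Nat) : Int) = y * w + x := Int.toNat_of_nonneg hidx0
    have hi0len : (y * w + x).toNat < pixels.length := by omega
    have hcoord : pvCoord w (y * w + x).toNat = (x, y) := pvCoord_idx (by omega) hx0 hxw hy0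
    have hget' : r[(y * w + x).toNat]? = some pixel := by
      rw [PySem.List.pyGet?_of_nonneg r hidx0] at hget
      exact hget
    have hpx : r[(y * w + x).toNat]? = pixels[(y * w + x).toNat]? :=
      (hR _ hi0len).2 (fun hm => hv (hcoord ▸ hm.1))
    have hpix : pixels[(y * w + x).toNat]? = some pixel := by rw [← hpx, hget']
    have hgd : PySem.List.pyGetD pixels (y * w + x) (0, 0, 0, 0) = pixel := by
      rw [PySem.List.pyGetD_of_nonneg pixels _ hidx0, List.getD_eq_getElem?_getD, hpix]
      exact rfl
    have hbgF : pvBgAt w pixels (x, y) = false := by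
      have : pvBgAt w pixels (x, y) = pvIsBackgroundA pixel := by
        show pvAltBg (PySem.List.pyGetD pixels (y * w + x) (0, 0, 0, 0)) = _
        rw [hgd, pvAltBg_eq]
      rw [this]
      simpa using hbg
    have hmem' : ∀ a, a ∈ PySem.Set.add v (x, y) ↔ a ∈ v ∨ a = (x, y) :=
      fun a => PySem.Set.mem_add _ _ _
    refine ih hL ?_ ?_ ?_ (fun c hc => ?_) ?_ ?_
    · intro c hc
      rcases (hmem' c).mp hc with hc | rfl
      · exact hG c hc
      · exact ⟨hx0, hxw, hy0, hyh⟩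
    · intro i hi
      by_cases hieq : pvCoord w i = (x, y)
      · constructor
        · intro hm
          rw [hieq] at hm
          exact absurd hm.2 (by simp [hbgF])
        · intro _
          exact (hR i hi).2 (fun hm => hv (hieq ▸ hm.1))
      · constructor
        · intro hm
          refine (hR i hi).1 ⟨?_, hm.2⟩
          rcases (hmem' _).mp hm.1 with hmm | hmm
          · exact hmm
          · exact absurd hmm hieq
        · intro hnm
          exact (hR i hi).2 (fun hm => hnm ⟨(hmem' _).mpr (Or.inl hm.1), hm.2⟩)
    · intro c hc hbgcc
      rcases (hmem' c).mp hc with hc | rfl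
      · exact hS c hc hbgcc
      · exact absurd hbgcc (by simp [hbgF])
    · rcases hQ c (List.mem_cons_of_mem _ hc) with hb | ⟨d, hd, hbgd, hadj⟩
      · exact Or.inl hb
      · exact Or.inr ⟨d, (hmem' d).mpr (Or.inl hd), hbgd, hadj⟩
    · intro c hb
      rcases hC1 c hb with hm | hm
      · exact Or.inl ((hmem' c).mpr (Or.inl hm))
      · rcases List.mem_cons.mp hm with rfl | hm
        · exact Or.inl ((hmem' _).mpr (Or.inr rfl))
        · exact Or.inr hm
    · intro c d hc hbgcc hadj hgd
      rcases (hmem' c).mp hc with hc | rfl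
      · rcases hC2 c d hc hbgcc hadj hgd with hm | hm
        · exact Or.inl ((hmem' d).mpr (Or.inl hm))
        · rcases List.mem_cons.mp hm with rfl | hm
          · exact Or.inl ((hmem' _).mpr (Or.inr rfl))
          · exact Or.inr hm
      · exact absurd hbgcc (by simp [hbgF])

-- seed queue facts and the degenerate (empty-grid) case
theorem pvSeed_border {w h : Int} (hw : 0 < w) (hh : 0 < h) :
    ∀ c ∈ pvSeedQueue w h, pvBorderP w h c := by
  intro c hc
  unfold pvSeedQueue at hc
  rcases List.mem_append.mp hc with hc | hc <;> rw [List.mem_flatMap] at hc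
  · obtain ⟨t, ht, hm⟩ := hc
    rw [PySem.List.mem_pyRange_one] at ht
    rcases (by simpa using hm : c = (t, 0) ∨ c = (t, h - 1)) with rfl | rfl
    · exact ⟨⟨ht.1, ht.2, by omega, by omega⟩, Or.inr (Or.inr (Or.inl rfl))⟩
    · exact ⟨⟨ht.1, ht.2, by omega, by omega⟩, Or.inr (Or.inr (Or.inr rfl))⟩
  · obtain ⟨t, ht, hm⟩ := hc
    rw [PySem.List.mem_pyRange_one] at ht
    rcases (by simpa using hm : c = (0, t) ∨ c = (w - 1, t)) with rfl | rfl
    · exact ⟨⟨by omega, by omega, ht.1, ht.2⟩, Or.inl rfl⟩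
    · exact ⟨⟨by omega, by omega, ht.1, ht.2⟩, Or.inr (Or.inl rfl)⟩

theorem pvBorder_mem_seed {w h : Int} :
    ∀ c, pvBorderP w h c → c ∈ pvSeedQueue w h := by
  rintro ⟨x, y⟩ ⟨⟨h1, h2, h3, h4⟩, hside⟩
  unfold pvSeedQueue
  rw [List.mem_append]
  rcases hside with h' | h' | h' | h'
  · refine Or.inr (List.mem_flatMap.mpr ⟨y, PySem.List.mem_pyRange_one.mpr ⟨h3, h4⟩, ?_⟩)
    simp only at h'
    subst h'
    simp
  · refine Or.inr (List.mem_flatMap.mpr ⟨y, PySem.List.mem_pyRange_one.mpr ⟨h3, h4⟩, ?_⟩)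
    simp only at h'
    subst h'
    simp
  · refine Or.inl (List.mem_flatMap.mpr ⟨x, PySem.List.mem_pyRange_one.mpr ⟨h1, h2⟩, ?_⟩)
    simp only at h'
    subst h'
    simp
  · refine Or.inl (List.mem_flatMap.mpr ⟨x, PySem.List.mem_pyRange_one.mpr ⟨h1, h2⟩, ?_⟩)
    simp only at h'
    subst h'
    simp

theorem pvBfs_skip_all {w h : Int} (visited : PySem.Set (Int × Int))
    (result : List (Int × Int × Int × Int)) (queue : List (Int × Int))
    (hq : ∀ c ∈ queue, c.1 < 0 ∨ w ≤ c.1 ∨ c.2 < 0 ∨ h ≤ c.2) :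
    pvBfs w h visited result queue = result := by
  induction queue with
  | nil => rw [pvBfs]
  | cons c rest ih =>
    obtain ⟨x, y⟩ := c
    rw [pvBfs]
    have hd := hq (x, y) List.mem_cons_self
    rw [if_pos (by tauto)]
    exact ih (fun d hd' => hq d (List.mem_cons_of_mem _ hd'))

theorem pvSeed_out {w h : Int} (hdeg : w ≤ 0 ∨ h ≤ 0) :
    ∀ c ∈ pvSeedQueue w h, c.1 < 0 ∨ w ≤ c.1 ∨ c.2 < 0 ∨ h ≤ c.2 := by
  intro c hc
  unfold pvSeedQueue at hc
  rcases List.mem_append.mp hc with hc | hc <;> rw [List.mem_flatMap] at hc <;>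
    obtain ⟨t, ht, hm⟩ := hc <;> rw [PySem.List.mem_pyRange_one] at ht
  · rcases (by simpa using hm : c = (t, 0) ∨ c = (t, h - 1)) with rfl | rfl <;> simp <;> omega
  · rcases (by simpa using hm : c = (0, t) ∨ c = (w - 1, t)) with rfl | rfl <;> simp <;> omega

-- ===== VERDICT (by name: the statement is the Claim_ definition above) =====
theorem remove_edge_white_spec : Claim_equal_remove_edge_white := by
  intro w h pixels hdom hpre
  unfold Spec_remove_edge_white
  by_cases hdeg : w ≤ 0 ∨ h ≤ 0
  · unfold remove_edge_white remove_edge_white_alt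
    rw [if_pos hdeg, pvBfs_skip_all _ _ _ (pvSeed_out hdeg)]
  · push_neg at hdeg
    obtain ⟨hw, hh⟩ := hdeg
    have hlen : w * h ≤ (pixels.length : Int) := by
      unfold Pre_remove_edge_white at hpre
      rcases hpre with hp | hp | hp
      · omega
      · omega
      · exact hp
    obtain ⟨hAl, hAe⟩ := pvBfs_char hw hh hlen PySem.Set.empty pixels (pvSeedQueue w h)
      rfl (by simp [PySem.Set.empty])
      (fun i hi => ⟨fun hm => absurd hm.1 (by simp [PySem.Set.empty]), fun _ => rfl⟩)
      (by simp [PySem.Set.empty])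
      (fun c hc => Or.inl (pvSeed_border hw hh c hc))
      (fun c hb => Or.inr (pvBorder_mem_seed c hb))
      (fun c d hc => absurd hc (by simp [PySem.Set.empty]))
    unfold remove_edge_white
    simp only [remove_edge_white_alt]
    rw [if_neg (by omega : ¬(w ≤ 0 ∨ h ≤ 0))]
    apply List.ext_getElem?
    intro i
    by_cases hi : i < pixels.length
    · rw [List.getElem?_map, PySem.List.getElem?_enumerate]
      obtain ⟨p, hp⟩ : ∃ p, pixels[i]? = some p := ⟨pixels[i], by simp [hi]⟩
      rw [hp]
      simp only [Option.map_some]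
      have hcc : (PySem.Int.mod ((0 : Int) + (i : Int)) w,
          PySem.Int.floordiv ((0 : Int) + (i : Int)) w) = pvCoord w i := by
        rw [PySem.Int.mod_eq_emod_of_pos hw, PySem.Int.floordiv_eq_ediv_of_pos hw]
        simp [pvCoord]
      rw [hcc]
      by_cases hr : pvReach w h pixels (pvCoord w i)
      · rw [if_pos ((pvFill_mem_iff _).mpr hr)]
        exact (hAe i hi).1 hr
      · rw [if_neg (fun hm => hr ((pvFill_mem_iff _).mp hm))]
        rw [(hAe i hi).2 hr, hp]
    · rw [List.getElem?_eq_none (by rw [hAl]; omega),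
        List.getElem?_eq_none (by rw [List.length_map, PySem.List.length_enumerate]; omega)]
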